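-- pv_equiv track=rewrite | github.com/Harshit-Arya-07/AI-HR-Platform- | ml-service/app/models/ml_models.py | _generate_technical_questions
-- ===== SOURCE A (Python) =====
-- from typing import Dict, List, Optional, Tuple, Any
--
-- def _generate_technical_questions(skills: List[str]) -> List[str]:
--     """Generate technical questions based on skills"""
--     questions = []
--
--     for skill in skills[:3]:  # Focus on top 3 skills
--         skill_lower = skill.lower()
--
--         if 'python' in skill_lower:
--             questions.append("Explain the difference between list comprehensions and generator expressions in Python.")
--         elif 'javascript' in skill_lower:
--             questions.append("What are the differences between var, let, and const in JavaScript?")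
--         elif 'react' in skill_lower:
--             questions.append("How do you handle state management in a large React application?")
--         elif 'sql' in skill_lower or 'database' in skill_lower:
--             questions.append("Explain the difference between INNER JOIN and LEFT JOIN.")
--         elif 'aws' in skill_lower or 'cloud' in skill_lower:
--             questions.append("How would you design a scalable architecture on AWS?")
--         else:
--             questions.append(f"Describe a challenging problem you solved using {skill}.")
--
--     return questions
-- ===== SOURCE B (Python) =====
-- # B: staged passes with swapped loop order -- rules outer, skill slots inner.
-- # Each rule fills still-empty slots it matches; a final pass fills defaults.
-- _RULES = [
--     (('python',), "Explain the difference between list comprehensions and generator expressions in Python."),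
--     (('javascript',), "What are the differences between var, let, and const in JavaScript?"),
--     (('react',), "How do you handle state management in a large React application?"),
--     (('sql', 'database'), "Explain the difference between INNER JOIN and LEFT JOIN."),
--     (('aws', 'cloud'), "How would you design a scalable architecture on AWS?"),
-- ]
--
-- def _generate_technical_questions(skills):
--     top = skills[:3]
--     state = [(s.lower(), None) for s in top]
--     for keywords, question in _RULES:
--         state = [(low, question if ans is None and any(k in low for k in keywords) else ans)
--                  for (low, ans) in state]
--     return [ans if ans is not None else f"Describe a challenging problem you solved using {skill}."
--             for (low, ans), skill in zip(state, top)]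
-- ===== Notes on version B (the rewrite author's own statement) =====
-- stated objective: alternative
-- what changed: Swaps the loop order: instead of testing the keyword chain per skill, B runs the rules table in the outer loop over a parallel state of (lowered skill, answer) slots, each rule filling only still-empty slots it matches, then a final pass fills defaults for unmatched slots.
import Mathlib
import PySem

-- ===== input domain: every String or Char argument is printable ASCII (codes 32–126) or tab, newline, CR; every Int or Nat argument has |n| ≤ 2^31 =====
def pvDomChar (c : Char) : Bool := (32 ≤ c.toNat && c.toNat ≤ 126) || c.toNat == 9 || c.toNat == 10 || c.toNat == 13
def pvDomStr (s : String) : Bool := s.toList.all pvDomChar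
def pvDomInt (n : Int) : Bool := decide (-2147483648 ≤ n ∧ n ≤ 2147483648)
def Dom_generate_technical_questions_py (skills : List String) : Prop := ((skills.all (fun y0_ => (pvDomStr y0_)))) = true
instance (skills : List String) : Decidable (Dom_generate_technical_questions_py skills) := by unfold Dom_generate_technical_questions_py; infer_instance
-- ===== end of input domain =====

-- B swaps the loop order: rules outer over a parallel (lowered skill, answer) state,
-- each rule filling still-empty slots it matches, then a defaults pass (alternative, same cost).


-- ===== PORT A =====
def generate_technical_questions_py (skills : List String) : List String :=
  (PySem.List.slice skills none (some 3)).foldl (fun questions skill =>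
    let skill_lower := PySem.Str.lower skill
    if PySem.Str.isIn "python" skill_lower then
      questions ++ ["Explain the difference between list comprehensions and generator expressions in Python."]
    else if PySem.Str.isIn "javascript" skill_lower then
      questions ++ ["What are the differences between var, let, and const in JavaScript?"]
    else if PySem.Str.isIn "react" skill_lower then
      questions ++ ["How do you handle state management in a large React application?"]
    else if PySem.Str.isIn "sql" skill_lower || PySem.Str.isIn "database" skill_lower then
      questions ++ ["Explain the difference between INNER JOIN and LEFT JOIN."]
    else if PySem.Str.isIn "aws" skill_lower || PySem.Str.isIn "cloud" skill_lower then
      questions ++ ["How would you design a scalable architecture on AWS?"]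
    else
      questions ++ ["Describe a challenging problem you solved using " ++ skill ++ "."]) []

-- ===== PORT B =====
def pvRules : List (List String × String) :=
  [(["python"], "Explain the difference between list comprehensions and generator expressions in Python."),
   (["javascript"], "What are the differences between var, let, and const in JavaScript?"),
   (["react"], "How do you handle state management in a large React application?"),
   (["sql", "database"], "Explain the difference between INNER JOIN and LEFT JOIN."),
   (["aws", "cloud"], "How would you design a scalable architecture on AWS?")]

-- one slot update by one rule: fill the answer iff it is still empty and a keyword matches
def pvFill (p : String × Option String) (rule : List String × String) : String × Option String :=
  (p.1, if p.2.isNone && rule.1.any (fun k => PySem.Str.isIn k p.1) then some rule.2 else p.2)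

def generate_technical_questions_py_alt (skills : List String) : List String :=
  let top := PySem.List.slice skills none (some 3)
  let state := pvRules.foldl (fun st rule => st.map (fun p => pvFill p rule))
      (top.map (fun s => (PySem.Str.lower s, (none : Option String))))
  (state.zip top).map (fun q =>
    match q.1.2 with
    | some ans => ans
    | none => "Describe a challenging problem you solved using " ++ q.2 ++ ".")

-- ===== PRECONDITION & SPEC =====
def Spec_generate_technical_questions_py (skills : List String) (out : List String) : Prop := out = generate_technical_questions_py_alt skills
instance (skills : List String) (out : List String) : Decidable (Spec_generate_technical_questions_py skills out) := by unfold Spec_generate_technical_questions_py; infer_instance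

-- ===== CLAIM (what is proved, stated in full; the proofs are below) =====
def Claim_equal_generate_technical_questions_py : Prop := ∀ (skills : List String), Dom_generate_technical_questions_py skills → Spec_generate_technical_questions_py skills (generate_technical_questions_py skills)

-- ===== LEMMAS AND PROOFS =====

-- A's per-skill question (proof helper: what A's chain computes for one skill)
def pvAq (skill : String) : String :=
  let skill_lower := PySem.Str.lower skill
  if PySem.Str.isIn "python" skill_lower then
    "Explain the difference between list comprehensions and generator expressions in Python."
  else if PySem.Str.isIn "javascript" skill_lower then
    "What are the differences between var, let, and const in JavaScript?"
  else if PySem.Str.isIn "react" skill_lower then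
    "How do you handle state management in a large React application?"
  else if PySem.Str.isIn "sql" skill_lower || PySem.Str.isIn "database" skill_lower then
    "Explain the difference between INNER JOIN and LEFT JOIN."
  else if PySem.Str.isIn "aws" skill_lower || PySem.Str.isIn "cloud" skill_lower then
    "How would you design a scalable architecture on AWS?"
  else
    "Describe a challenging problem you solved using " ++ skill ++ "."

-- A's fold is the map of its per-skill chain
theorem pvAfold (ys : List String) (acc : List String) :
    ys.foldl (fun questions skill =>
      let skill_lower := PySem.Str.lower skill
      if PySem.Str.isIn "python" skill_lower then
        questions ++ ["Explain the difference between list comprehensions and generator expressions in Python."]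
      else if PySem.Str.isIn "javascript" skill_lower then
        questions ++ ["What are the differences between var, let, and const in JavaScript?"]
      else if PySem.Str.isIn "react" skill_lower then
        questions ++ ["How do you handle state management in a large React application?"]
      else if PySem.Str.isIn "sql" skill_lower || PySem.Str.isIn "database" skill_lower then
        questions ++ ["Explain the difference between INNER JOIN and LEFT JOIN."]
      else if PySem.Str.isIn "aws" skill_lower || PySem.Str.isIn "cloud" skill_lower then
        questions ++ ["How would you design a scalable architecture on AWS?"]
      else
        questions ++ ["Describe a challenging problem you solved using " ++ skill ++ "."]) acc
    = acc ++ ys.map pvAq := by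
  induction ys generalizing acc with
  | nil => simp
  | cons y ys ih =>
    simp only [List.foldl, List.map, pvAq]
    rw [ih]
    split_ifs <;> simp [List.append_assoc]

theorem pvA_eq_map (xs : List String) :
    generate_technical_questions_py xs = (PySem.List.slice xs none (some 3)).map pvAq := by
  unfold generate_technical_questions_py
  simpa using pvAfold (PySem.List.slice xs none (some 3)) []

-- rules-outer map fold commutes to per-slot rule fold
theorem pvFoldMapComm {α β : Type} (g : α → β → α) (rules : List β) (st : List α) :
    rules.foldl (fun st r => st.map (fun p => g p r)) st
      = st.map (fun p => rules.foldl g p) := by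
  induction rules generalizing st with
  | nil => simp
  | cons r rs ih =>
    simp only [List.foldl]
    rw [ih, List.map_map]
    rfl

theorem pvZipMapLeft {α β : Type} (f : α → β) (xs : List α) :
    (xs.map f).zip xs = xs.map (fun x => (f x, x)) := by
  induction xs with
  | nil => rfl
  | cons x xs ih =>
    simp only [List.map, List.zip] at ih ⊢
    simp [ih]

-- per skill: B's rule fold + default equals A's chain
theorem pvSlot_eq (s : String) :
    (match (pvRules.foldl pvFill (PySem.Str.lower s, (none : Option String))).2 with
     | some ans => ans
     | none => "Describe a challenging problem you solved using " ++ s ++ ".") = pvAq s := by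
  unfold pvAq pvRules pvFill
  cases h1 : PySem.Chars.isIn ['p', 'y', 't', 'h', 'o', 'n'] (PySem.Chars.lower s.toList) <;>
  cases h2 : PySem.Chars.isIn ['j', 'a', 'v', 'a', 's', 'c', 'r', 'i', 'p', 't'] (PySem.Chars.lower s.toList) <;>
  cases h3 : PySem.Chars.isIn ['r', 'e', 'a', 'c', 't'] (PySem.Chars.lower s.toList) <;>
  cases h4 : PySem.Chars.isIn ['s', 'q', 'l'] (PySem.Chars.lower s.toList) <;>
  cases h5 : PySem.Chars.isIn ['d', 'a', 't', 'a', 'b', 'a', 's', 'e'] (PySem.Chars.lower s.toList) <;>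
  cases h6 : PySem.Chars.isIn ['a', 'w', 's'] (PySem.Chars.lower s.toList) <;>
  cases h7 : PySem.Chars.isIn ['c', 'l', 'o', 'u', 'd'] (PySem.Chars.lower s.toList) <;>
    simp [List.foldl, List.any, PySem.Str.isIn, PySem.Str.lower, h1, h2, h3, h4, h5, h6, h7]

-- ===== VERDICT (by name: the statement is the Claim_ definition above) =====
theorem generate_technical_questions_py_spec : Claim_equal_generate_technical_questions_py := by
  intro skills _
  unfold Spec_generate_technical_questions_py generate_technical_questions_py_alt
  rw [pvA_eq_map skills]
  simp only [pvFoldMapComm, List.map_map, pvZipMapLeft]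
  apply List.map_congr_left
  intro s _
  simpa using (pvSlot_eq s).symm
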